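-- pv_equiv track=rewrite | github.com/Harikrish-89/AdventOfCode-2025 | printing_department/part_2.py | find_accessible_roll_paper
-- ===== SOURCE A (Python) =====
-- from pprint import pprint
--
-- def find_accessible_roll_paper(roll_paper_map):
--     removed_rolls = 0
--     clone = [row[:] for row in roll_paper_map]
--     for row in range(len(roll_paper_map)):
--         for col in range(len(roll_paper_map[0])):
--             if roll_paper_map[row][col] == '@' and is_accessible(roll_paper_map, row, col):
--                 clone[row][col] = '.'
--                 removed_rolls += 1
--     pprint(clone)
--     return removed_rolls, clone
--
-- def is_accessible(roll_paper_map, row, col):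
--     directions = [
--         (0, 1),   # east
--         (0, -1),  # west
--         (1, 0),   # south
--         (-1, 0),  # north
--         (-1, 1),  # northwest
--         (-1, -1), # northeast
--         (1, 1),   # southwest
--         (1, -1)   # southeast
--     ]
--
--     rows = len(roll_paper_map)
--     cols = len(roll_paper_map[0])
--
--     adjacent_rolls = 0
--     for dr, dc in directions:
--         nr, nc = row + dr, col + dc
--         if 0 <= nr < rows and 0 <= nc < cols:
--             if roll_paper_map[nr][nc] == '@':
--                 adjacent_rolls += 1
--
--     return adjacent_rolls < 4
-- ===== SOURCE B (Python) =====
-- OFFSETS = ((-1, -1), (-1, 0), (-1, 1), (0, -1), (0, 1), (1, -1), (1, 0), (1, 1))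
--
-- def find_accessible_roll_paper(roll_paper_map):
--     rows = len(roll_paper_map)
--     cols = len(roll_paper_map[0]) if roll_paper_map else 0
--     # scatter pass: counts[i][j] = number of '@' cells among the 8 neighbours of (i, j)
--     counts = [[0] * cols for _ in range(rows)]
--     for r in range(rows):
--         for c in range(cols):
--             if roll_paper_map[r][c] == '@':
--                 for dr, dc in OFFSETS:
--                     nr, nc = r + dr, c + dc
--                     if 0 <= nr < rows and 0 <= nc < cols:
--                         counts[nr][nc] += 1
--     # removal pass
--     removed_rolls = 0
--     clone = [row[:] for row in roll_paper_map]
--     for r in range(rows):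
--         for c in range(cols):
--             if roll_paper_map[r][c] == '@' and counts[r][c] < 4:
--                 clone[r][c] = '.'
--                 removed_rolls += 1
--     return removed_rolls, clone
-- ===== Notes on version B (the rewrite author's own statement) =====
-- stated objective: alternative
-- what changed: A decides each cell by gathering its 8 neighbours on the spot; B first builds a counts table with a scatter pass (each '@' increments all in-bounds neighbours once), then removes cells whose tabulated count is < 4 in a separate pass.
import Mathlib
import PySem

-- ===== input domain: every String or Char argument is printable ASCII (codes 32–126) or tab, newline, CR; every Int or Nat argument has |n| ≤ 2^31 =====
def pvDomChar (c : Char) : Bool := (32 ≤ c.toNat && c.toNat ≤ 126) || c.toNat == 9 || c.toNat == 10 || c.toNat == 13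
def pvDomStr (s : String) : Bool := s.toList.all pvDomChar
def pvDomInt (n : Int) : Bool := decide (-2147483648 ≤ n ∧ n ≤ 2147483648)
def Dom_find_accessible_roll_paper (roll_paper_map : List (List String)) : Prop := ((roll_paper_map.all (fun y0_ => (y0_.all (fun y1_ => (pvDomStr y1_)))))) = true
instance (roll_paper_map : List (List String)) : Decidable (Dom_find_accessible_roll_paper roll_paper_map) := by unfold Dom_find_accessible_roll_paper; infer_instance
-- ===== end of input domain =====

-- B replaces A's per-cell gather of '@' neighbours by a scatter pass that tabulates every cell's
-- neighbour count once, then a separate removal pass (alternative decomposition, same cost).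
-- A also pprints the clone (a side effect B omits and the Lean ports do not model); the equivalence is about the return value.

-- ===== PORT A =====
-- roll_paper_map[r][c] (in-range under Pre_; out of range Python raises, pyGetD's default is never the claim's concern there)
def pvCellA (m : List (List String)) (r c : Int) : String :=
  PySem.List.pyGetD (PySem.List.pyGetD m r []) c ""

def pvDirsA : List (Int × Int) :=
  [(0, 1), (0, -1), (1, 0), (-1, 0), (-1, 1), (-1, -1), (1, 1), (1, -1)]

def is_accessible (roll_paper_map : List (List String)) (row col : Int) : Bool :=
  let rows : Int := (roll_paper_map.length : Int)
  let cols : Int := ((PySem.List.pyGetD roll_paper_map 0 []).length : Int)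
  let adjacent_rolls : Int := pvDirsA.foldl (fun acc d =>
    let nr := row + d.1
    let nc := col + d.2
    if 0 ≤ nr ∧ nr < rows ∧ 0 ≤ nc ∧ nc < cols then
      (if pvCellA roll_paper_map nr nc = "@" then acc + 1 else acc)
    else acc) 0
  decide (adjacent_rolls < 4)

def find_accessible_roll_paper (roll_paper_map : List (List String)) : Int × List (List String) :=
  let rows : Int := (roll_paper_map.length : Int)
  let cols : Int := ((PySem.List.pyGetD roll_paper_map 0 []).length : Int)
  (PySem.List.pyRange 0 rows 1).foldl (fun st row =>
    (PySem.List.pyRange 0 cols 1).foldl (fun st col =>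
      if pvCellA roll_paper_map row col = "@" ∧ is_accessible roll_paper_map row col = true then
        (st.1 + 1,
         PySem.List.pySetD st.2 row
           (PySem.List.pySetD (PySem.List.pyGetD st.2 row []) col "."))
      else st) st)
    (0, roll_paper_map.map (fun row => row))

-- ===== PORT B =====
def pvOffsetsB : List (Int × Int) :=
  [(-1, -1), (-1, 0), (-1, 1), (0, -1), (0, 1), (1, -1), (1, 0), (1, 1)]

-- counts[p.1][p.2] += 1
def pvIncB (g : List (List Int)) (p : Int × Int) : List (List Int) :=
  PySem.List.pySetD g p.1
    (PySem.List.pySetD (PySem.List.pyGetD g p.1 []) p.2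
      (PySem.List.pyGetD (PySem.List.pyGetD g p.1 []) p.2 0 + 1))

def pvCountsB (roll_paper_map : List (List String)) : List (List Int) :=
  let rows : Int := (roll_paper_map.length : Int)
  let cols : Int := if roll_paper_map = [] then 0 else ((PySem.List.pyGetD roll_paper_map 0 []).length : Int)
  (PySem.List.pyRange 0 rows 1).foldl (fun g r =>
    (PySem.List.pyRange 0 cols 1).foldl (fun g c =>
      if pvCellA roll_paper_map r c = "@" then
        pvOffsetsB.foldl (fun g d =>
          let nr := r + d.1
          let nc := c + d.2
          if 0 ≤ nr ∧ nr < rows ∧ 0 ≤ nc ∧ nc < cols then pvIncB g (nr, nc) else g) g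
      else g) g)
    ((PySem.List.pyRange 0 rows 1).map
      (fun _ => List.replicate cols.toNat (0 : Int)))

def find_accessible_roll_paper_alt (roll_paper_map : List (List String)) : Int × List (List String) :=
  let rows : Int := (roll_paper_map.length : Int)
  let cols : Int := if roll_paper_map = [] then 0 else ((PySem.List.pyGetD roll_paper_map 0 []).length : Int)
  let counts := pvCountsB roll_paper_map
  (PySem.List.pyRange 0 rows 1).foldl (fun st r =>
    (PySem.List.pyRange 0 cols 1).foldl (fun st c =>
      if pvCellA roll_paper_map r c = "@" ∧
         PySem.List.pyGetD (PySem.List.pyGetD counts r []) c 0 < 4 then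
        (st.1 + 1,
         PySem.List.pySetD st.2 r
           (PySem.List.pySetD (PySem.List.pyGetD st.2 r []) c "."))
      else st) st)
    (0, roll_paper_map.map (fun row => row))

-- ===== PRECONDITION & SPEC =====
-- Pre_ excludes exactly the inputs where Python A raises an IndexError: maps with a row
-- shorter than the first row (A reads every row at all columns 0..len(row0)-1).
def Pre_find_accessible_roll_paper (roll_paper_map : List (List String)) : Prop :=
  ∀ row ∈ roll_paper_map, (roll_paper_map.headD []).length ≤ row.length
instance (roll_paper_map : List (List String)) : Decidable (Pre_find_accessible_roll_paper roll_paper_map) := by unfold Pre_find_accessible_roll_paper; infer_instance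

def pvWitness_find_accessible_roll_paper : List (List String) :=
  [["@", "@", "."], [".", "@", "@"]]

def Spec_find_accessible_roll_paper (roll_paper_map : List (List String)) (out : Int × List (List String)) : Prop := out = find_accessible_roll_paper_alt roll_paper_map
instance (roll_paper_map : List (List String)) (out : Int × List (List String)) : Decidable (Spec_find_accessible_roll_paper roll_paper_map out) := by unfold Spec_find_accessible_roll_paper; infer_instance

-- ===== CLAIM (what is proved, stated in full; the proofs are below) =====
def Claim_equal_find_accessible_roll_paper : Prop := ∀ (roll_paper_map : List (List String)), Dom_find_accessible_roll_paper roll_paper_map → Pre_find_accessible_roll_paper roll_paper_map → Spec_find_accessible_roll_paper roll_paper_map (find_accessible_roll_paper roll_paper_map)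

-- ===== LEMMAS AND PROOFS =====

-- abbreviation: entry of a counts grid
def pvEntry (g : List (List Int)) (i j : Int) : Int :=
  PySem.List.pyGetD (PySem.List.pyGetD g i []) j 0

-- the flattened cell list of the two nested ranges
def pvCells (rows cols : Int) : List (Int × Int) :=
  (PySem.List.pyRange 0 rows 1).flatMap
    (fun r => (PySem.List.pyRange 0 cols 1).map (fun c => (r, c)))

-- the list of positions one scatter step writes to, for the cell (r, c)
def pvNbrs (m : List (List String)) (rows cols : Int) (r c : Int) : List (Int × Int) :=
  if pvCellA m r c = "@" then
    (pvOffsetsB.filter (fun d =>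
        decide (0 ≤ r + d.1 ∧ r + d.1 < rows ∧ 0 ≤ c + d.2 ∧ c + d.2 < cols))).map
      (fun d => (r + d.1, c + d.2))
  else []

-- the guarded cols of port B equals the unguarded expression (pyGetD's default is [] on the empty map)
theorem pv_cols_eq (m : List (List String)) :
    (if m = [] then (0 : Int) else ((PySem.List.pyGetD m 0 []).length : Int))
      = ((PySem.List.pyGetD m 0 []).length : Int) := by
  cases m <;> simp [PySem.List.pyGetD]

theorem pvEntry_inc (g : List (List Int)) (p : Int × Int) (i j : Int)
    (h0 : 0 ≤ p.1) (h1 : p.1 < (g.length : Int))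
    (h2 : 0 ≤ p.2) (h3 : ∀ row ∈ g, p.2 < (row.length : Int))
    (hi0 : 0 ≤ i) (hi1 : i < (g.length : Int)) (hj0 : 0 ≤ j) :
    pvEntry (pvIncB g p) i j = if p = (i, j) then pvEntry g i j + 1 else pvEntry g i j := by
  obtain ⟨a, b⟩ := p
  simp only [pvEntry, pvIncB] at *
  have ha : a.toNat < g.length := by omega
  have hi : i.toNat < g.length := by omega
  have hrowa : PySem.List.pyGetD g a [] = g[a.toNat] := PySem.List.pyGetD_eq_getElem _ _ h0 h1
  have hb : b.toNat < g[a.toNat].length := by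
    have := h3 _ (List.getElem_mem ha); omega
  rw [PySem.List.pySetD_of_nonneg _ _ h0, hrowa,
    PySem.List.pySetD_of_nonneg _ _ h2,
    PySem.List.pyGetD_eq_getElem _ _ hi0 (by simpa using hi1),
    PySem.List.pyGetD_eq_getElem _ _ hi0 hi1,
    PySem.List.pyGetD_of_nonneg _ _ hj0, PySem.List.pyGetD_of_nonneg _ _ h2,
    List.getElem_set]
  by_cases hai : a.toNat = i.toNat
  · have hai' : a = i := by omega
    simp only [hai, if_true]
    by_cases hbj : b = j
    · subst hbj
      have : (a, b) = (i, b) := by simp [hai']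
      rw [if_pos this, List.getD_eq_getElem?_getD, List.getElem?_set_self (by simpa [← hai] using hb)]
      simp [PySem.List.pyGetD_of_nonneg _ _ h2, List.getD_eq_getElem?_getD]
    · have : ¬ ((a, b) = (i, j)) := by simp [Prod.ext_iff, hbj]
      rw [if_neg this]
      have hbj' : b.toNat ≠ j.toNat := by omega
      rw [List.getD_eq_getElem?_getD, List.getElem?_set_ne hbj']
      simp [PySem.List.pyGetD_of_nonneg _ _ hj0, List.getD_eq_getElem?_getD]
  · have : ¬ ((a, b) = (i, j)) := by simp [Prod.ext_iff]; intro h; omega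
    simp [hai, this, PySem.List.pyGetD_of_nonneg _ _ hj0, List.getD_eq_getElem?_getD]

theorem pvIncB_length (g : List (List Int)) (p : Int × Int) :
    (pvIncB g p).length = g.length := by
  simp [pvIncB, PySem.List.length_pySetD]

theorem pvIncB_row_length' (g : List (List Int)) (p : Int × Int) (n : Nat)
    (h0 : 0 ≤ p.1) (h1 : p.1 < (g.length : Int)) (h2 : 0 ≤ p.2)
    (h : ∀ row ∈ g, row.length = n) : ∀ row ∈ pvIncB g p, row.length = n := by
  intro row hrow
  rw [pvIncB, PySem.List.pySetD_of_nonneg _ _ h0] at hrow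
  rcases List.mem_or_eq_of_mem_set hrow with h' | h'
  · exact h _ h'
  · subst h'
    have hcont : p.1.toNat < g.length := by omega
    rw [PySem.List.pySetD_of_nonneg _ _ h2, List.length_set,
      PySem.List.pyGetD_of_nonneg _ _ h0, List.getD_eq_getElem?_getD,
      List.getElem?_eq_getElem hcont]
    exact h _ (List.getElem_mem hcont)

theorem pvEntry_foldl (rows cols : Int) (S : List (Int × Int)) :
    ∀ g : List (List Int), (g.length : Int) = rows → (∀ row ∈ g, (row.length : Int) = cols) →
    (∀ p ∈ S, 0 ≤ p.1 ∧ p.1 < rows ∧ 0 ≤ p.2 ∧ p.2 < cols) →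
    ∀ i j : Int, 0 ≤ i → i < rows → 0 ≤ j → j < cols →
    pvEntry (S.foldl pvIncB g) i j = pvEntry g i j + (S.count (i, j) : Int) := by
  induction S with
  | nil => intro g _ _ _ i j _ _ _ _; simp
  | cons p S ih =>
    intro g hlen hrows hS i j hi0 hi1 hj0 hj1
    have hp := hS p List.mem_cons_self
    have hlen' : ((pvIncB g p).length : Int) = rows := by
      rw [pvIncB_length]; exact hlen
    have hrows' : ∀ row ∈ pvIncB g p, (row.length : Int) = cols := by
      have : ∀ row ∈ g, row.length = cols.toNat := by
        intro row hr; have := hrows row hr; omega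
      intro row hr
      have := pvIncB_row_length' g p cols.toNat hp.1 (by omega) hp.2.2.1 this row hr
      omega
    rw [List.foldl_cons, ih (pvIncB g p) hlen' hrows'
      (fun q hq => hS q (List.mem_cons_of_mem _ hq)) i j hi0 hi1 hj0 hj1]
    rw [pvEntry_inc g p i j hp.1 (by omega) hp.2.2.1
      (fun row hr => by have := hrows row hr; omega) hi0 (by omega) hj0]
    by_cases hpij : p = (i, j)
    · rw [if_pos hpij, List.count_cons]
      simp [hpij]; ring
    · rw [if_neg hpij, List.count_cons]
      simp [hpij]


theorem pv_foldl_flat {α β γ : Type} (R : List β) (f : β → List γ) (step : α → γ → α) (g0 : α) :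
    R.foldl (fun g x => (f x).foldl step g) g0 = (R.flatMap f).foldl step g0 := by
  induction R generalizing g0 with
  | nil => rfl
  | cons r R ih =>
    simp only [List.flatMap_cons, List.foldl_append, List.foldl_cons]
    exact ih _

theorem pv_body_eq (m : List (List String)) (rows cols r c : Int) (g : List (List Int)) :
    (if pvCellA m r c = "@" then
      pvOffsetsB.foldl (fun g d =>
        if 0 ≤ r + d.1 ∧ r + d.1 < rows ∧ 0 ≤ c + d.2 ∧ c + d.2 < cols then
          pvIncB g (r + d.1, c + d.2)
        else g) g
    else g) = (pvNbrs m rows cols r c).foldl pvIncB g := by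
  by_cases h : pvCellA m r c = "@"
  · rw [if_pos h, pvNbrs, if_pos h,
      PySem.List.foldl_ite_eq_foldl_filter
        (fun d : Int × Int => 0 ≤ r + d.1 ∧ r + d.1 < rows ∧ 0 ≤ c + d.2 ∧ c + d.2 < cols)
        (fun g d => pvIncB g (r + d.1, c + d.2)),
      ← List.foldl_map]
  · rw [if_neg h, pvNbrs, if_neg h]; rfl

theorem pvCounts_eq_foldl (m : List (List String)) :
    pvCountsB m =
      ((pvCells (m.length : Int) ((PySem.List.pyGetD m 0 []).length : Int)).flatMap
        (fun rc => pvNbrs m (m.length : Int) ((PySem.List.pyGetD m 0 []).length : Int) rc.1 rc.2)).foldl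
        pvIncB
        ((PySem.List.pyRange 0 (m.length : Int) 1).map
          (fun _ => List.replicate ((PySem.List.pyGetD m 0 []).length) (0 : Int))) := by
  simp only [pvCountsB, pv_cols_eq, pv_body_eq, pvCells, pv_foldl_flat]
  congr 1
  simp [List.flatMap_def, List.map_map, Function.comp_def, List.flatten_flatten]

theorem pv_mem_cells (rows cols : Int) (rc : Int × Int) :
    rc ∈ pvCells rows cols ↔ 0 ≤ rc.1 ∧ rc.1 < rows ∧ 0 ≤ rc.2 ∧ rc.2 < cols := by
  obtain ⟨r, c⟩ := rc
  simp [pvCells, List.mem_flatMap, PySem.List.mem_pyRange_one, Prod.ext_iff]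
  aesop

theorem pv_nodup_cells (rows cols : Int) : (pvCells rows cols).Nodup := by
  have h : pvCells rows cols = (PySem.List.pyRange 0 rows 1) ×ˢ (PySem.List.pyRange 0 cols 1) := rfl
  rw [h]
  exact List.Nodup.product (PySem.List.nodup_pyRange_one _ _) (PySem.List.nodup_pyRange_one _ _)

theorem pv_offsets_symm (a b : Int) : (-a, -b) ∈ pvOffsetsB ↔ (a, b) ∈ pvDirsA := by
  simp [pvOffsetsB, pvDirsA, Prod.ext_iff]
  omega

theorem pv_count_nbrs (m : List (List String)) (rows cols : Int) (r c i j : Int)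
    (hi0 : 0 ≤ i) (hi1 : i < rows) (hj0 : 0 ≤ j) (hj1 : j < cols) :
    (pvNbrs m rows cols r c).count (i, j)
      = if pvCellA m r c = "@" ∧ (i - r, j - c) ∈ pvOffsetsB then 1 else 0 := by
  by_cases h : pvCellA m r c = "@"
  · rw [pvNbrs, if_pos h]
    have hnd : ((pvOffsetsB.filter (fun d =>
        decide (0 ≤ r + d.1 ∧ r + d.1 < rows ∧ 0 ≤ c + d.2 ∧ c + d.2 < cols))).map
        (fun d : Int × Int => (r + d.1, c + d.2))).Nodup := by
      apply List.Nodup.map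
      · intro d1 d2 hd
        obtain ⟨x1, y1⟩ := d1; obtain ⟨x2, y2⟩ := d2
        simp only [Prod.ext_iff] at hd ⊢
        omega
      · exact List.Nodup.filter _ (by decide)
    have hmem : ((i, j) ∈ (pvOffsetsB.filter (fun d =>
        decide (0 ≤ r + d.1 ∧ r + d.1 < rows ∧ 0 ≤ c + d.2 ∧ c + d.2 < cols))).map
        (fun d : Int × Int => (r + d.1, c + d.2))) ↔ (i - r, j - c) ∈ pvOffsetsB := by
      simp only [List.mem_map, List.mem_filter, decide_eq_true_eq]
      constructor
      · rintro ⟨⟨dx, dy⟩, ⟨hd, _⟩, heq⟩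
        simp only [Prod.ext_iff] at heq
        have hx : dx = i - r := by omega
        have hy : dy = j - c := by omega
        rw [hx, hy] at hd; exact hd
      · intro hd
        exact ⟨(i - r, j - c), ⟨hd, by constructor <;> [omega; constructor <;> [omega; constructor <;> omega]]⟩,
          by simp only [Prod.ext_iff]; omega⟩
    by_cases hm : (i - r, j - c) ∈ pvOffsetsB
    · rw [if_pos ⟨h, hm⟩]
      exact List.count_eq_one_of_mem hnd (hmem.mpr hm)
    · rw [if_neg (by tauto)]
      exact List.count_eq_zero_of_not_mem (fun hx => hm (hmem.mp hx))
  · rw [pvNbrs, if_neg h, if_neg (by tauto)]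
    rfl

theorem pv_adj_eq_countP (m : List (List String)) (rows cols i j : Int) :
    (pvDirsA.foldl (fun acc d =>
        if 0 ≤ i + d.1 ∧ i + d.1 < rows ∧ 0 ≤ j + d.2 ∧ j + d.2 < cols then
          (if pvCellA m (i + d.1) (j + d.2) = "@" then acc + 1 else acc)
        else acc) 0)
      = (pvDirsA.countP (fun d =>
          decide ((0 ≤ i + d.1 ∧ i + d.1 < rows ∧ 0 ≤ j + d.2 ∧ j + d.2 < cols) ∧
            pvCellA m (i + d.1) (j + d.2) = "@")) : Int) := by
  have h1 := PySem.List.foldl_congr_mem (l := pvDirsA) (init := (0 : Int))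
    (f := fun acc (d : Int × Int) =>
      if 0 ≤ i + d.1 ∧ i + d.1 < rows ∧ 0 ≤ j + d.2 ∧ j + d.2 < cols then
        if pvCellA m (i + d.1) (j + d.2) = "@" then acc + 1 else acc
      else acc)
    (g := fun acc (d : Int × Int) =>
      if (0 ≤ i + d.1 ∧ i + d.1 < rows ∧ 0 ≤ j + d.2 ∧ j + d.2 < cols) ∧
         pvCellA m (i + d.1) (j + d.2) = "@" then acc + 1 else acc)
    (fun acc d _ => by dsimp only; split_ifs <;> tauto)
  rw [h1, PySem.List.foldl_ite_add_one]
  simp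

-- the filtered cells are a permutation of the filtered, shifted directions
theorem pv_countP_cells (m : List (List String)) (rows cols i j : Int) :
    (pvCells rows cols).countP
        (fun rc => decide (pvCellA m rc.1 rc.2 = "@" ∧ (i - rc.1, j - rc.2) ∈ pvOffsetsB))
      = pvDirsA.countP (fun d =>
          decide ((0 ≤ i + d.1 ∧ i + d.1 < rows ∧ 0 ≤ j + d.2 ∧ j + d.2 < cols) ∧
            pvCellA m (i + d.1) (j + d.2) = "@")) := by
  have h2 : pvDirsA.countP (fun d =>
        decide ((0 ≤ i + d.1 ∧ i + d.1 < rows ∧ 0 ≤ j + d.2 ∧ j + d.2 < cols) ∧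
          pvCellA m (i + d.1) (j + d.2) = "@"))
      = (pvDirsA.map (fun d : Int × Int => (i + d.1, j + d.2))).countP
          (fun q : Int × Int => decide ((0 ≤ q.1 ∧ q.1 < rows ∧ 0 ≤ q.2 ∧ q.2 < cols) ∧
            pvCellA m q.1 q.2 = "@")) := by
    rw [List.countP_map]; rfl
  rw [h2]
  · simp only [List.countP_eq_length_filter]
    apply List.Perm.length_eq
    rw [List.perm_ext_iff_of_nodup]
    · rintro ⟨a, b⟩
      simp only [List.mem_filter, List.mem_map, decide_eq_true_eq, pv_mem_cells]
      constructor
      · rintro ⟨hmem, hcell, hoff⟩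
        refine ⟨⟨(a - i, b - j), ?_, by simp only [Prod.ext_iff]; omega⟩, ?_, ?_⟩
        · have := (pv_offsets_symm (a - i) (b - j)).mp (by
            have : (i - a, j - b) = (-(a - i), -(b - j)) := by simp only [Prod.ext_iff]; omega
            rwa [this] at hoff)
          exact this
        · exact hmem
        · exact hcell
      · rintro ⟨⟨⟨dx, dy⟩, hd, heq⟩, hb, hcell⟩
        simp only [Prod.ext_iff] at heq
        refine ⟨⟨by omega, by omega, by omega, by omega⟩, hcell, ?_⟩
        have h1 : (i - a, j - b) = (-(a - i), -(b - j)) := by simp only [Prod.ext_iff]; omega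
        rw [h1, pv_offsets_symm]
        have : (a - i, b - j) = (dx, dy) := by simp only [Prod.ext_iff]; omega
        rw [this]; exact hd
    · exact List.Nodup.filter _ (pv_nodup_cells rows cols)
    · apply List.Nodup.filter
      apply List.Nodup.map
      · intro d1 d2 hd
        obtain ⟨x1, y1⟩ := d1; obtain ⟨x2, y2⟩ := d2
        simp only [Prod.ext_iff] at hd ⊢; omega
      · decide

theorem pv_nbrs_bounds (m : List (List String)) (rows cols r c : Int) :
    ∀ p ∈ pvNbrs m rows cols r c, 0 ≤ p.1 ∧ p.1 < rows ∧ 0 ≤ p.2 ∧ p.2 < cols := by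
  intro p hp
  rw [pvNbrs] at hp
  split at hp
  · simp only [List.mem_map, List.mem_filter, decide_eq_true_eq] at hp
    obtain ⟨d, ⟨_, hb⟩, heq⟩ := hp
    subst heq
    exact hb
  · simp at hp

theorem pv_counts_entry (m : List (List String)) (i j : Int)
    (hi0 : 0 ≤ i) (hi1 : i < (m.length : Int))
    (hj0 : 0 ≤ j) (hj1 : j < ((PySem.List.pyGetD m 0 []).length : Int)) :
    pvEntry (pvCountsB m) i j
      = pvDirsA.foldl (fun acc d =>
          if 0 ≤ i + d.1 ∧ i + d.1 < (m.length : Int) ∧ 0 ≤ j + d.2 ∧ j + d.2 < ((PySem.List.pyGetD m 0 []).length : Int) then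
            (if pvCellA m (i + d.1) (j + d.2) = "@" then acc + 1 else acc)
          else acc) 0 := by
  set rows : Int := (m.length : Int) with hrows
  set cols : Int := ((PySem.List.pyGetD m 0 []).length : Int) with hcols
  set g0 : List (List Int) :=
    (PySem.List.pyRange 0 rows 1).map (fun _ => List.replicate ((PySem.List.pyGetD m 0 []).length) (0 : Int)) with hg0
  set S : List (Int × Int) :=
    (pvCells rows cols).flatMap (fun rc => pvNbrs m rows cols rc.1 rc.2) with hS
  rw [pvCounts_eq_foldl]
  rw [pvEntry_foldl rows cols S g0
    (by simp [hg0, PySem.List.length_pyRange_one, hrows])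
    (by intro row hr; simp [hg0] at hr; rcases hr with ⟨-, h⟩; rw [h]; simp [hcols])
    (by intro p hp; rw [hS] at hp; simp only [List.mem_flatMap] at hp
        obtain ⟨rc, _, hpn⟩ := hp; exact pv_nbrs_bounds m rows cols rc.1 rc.2 p hpn)
    i j hi0 hi1 hj0 hj1]
  have hg0e : pvEntry g0 i j = 0 := by
    rw [pvEntry, PySem.List.pyGetD_eq_getElem _ _ hi0 (by simp [hg0, PySem.List.length_pyRange_one]; omega)]
    simp [hg0]
    rw [PySem.List.pyGetD_eq_getElem _ _ hj0 (by simp; omega)]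
    simp
  rw [hg0e, zero_add]
  have hcount : S.count (i, j) = pvDirsA.countP (fun d =>
      decide ((0 ≤ i + d.1 ∧ i + d.1 < rows ∧ 0 ≤ j + d.2 ∧ j + d.2 < cols) ∧
        pvCellA m (i + d.1) (j + d.2) = "@")) := by
    rw [hS, List.count_flatMap]
    have hmapc : (pvCells rows cols).map (List.count (i, j) ∘ fun rc => pvNbrs m rows cols rc.1 rc.2)
        = (pvCells rows cols).map (fun rc =>
            if decide (pvCellA m rc.1 rc.2 = "@" ∧ (i - rc.1, j - rc.2) ∈ pvOffsetsB) then 1 else 0) := by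
      apply List.map_congr_left
      intro rc _
      simp only [Function.comp_apply]
      rw [pv_count_nbrs m rows cols rc.1 rc.2 i j hi0 hi1 hj0 hj1]
      simp
    rw [hmapc, PySem.List.sum_map_ite_one_zero_nat]
    exact pv_countP_cells m rows cols i j
  rw [hcount, pv_adj_eq_countP m rows cols i j]

-- ===== VERDICT (by name: the statement is the Claim_ definition above) =====
theorem find_accessible_roll_paper_spec : Claim_equal_find_accessible_roll_paper := by
  intro m _ _
  show find_accessible_roll_paper m = find_accessible_roll_paper_alt m
  simp only [find_accessible_roll_paper, find_accessible_roll_paper_alt, pv_cols_eq]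
  apply PySem.List.foldl_congr_mem
  intro st r hr
  apply PySem.List.foldl_congr_mem
  intro st' c hc
  rw [PySem.List.mem_pyRange_one] at hr hc
  have hent := pv_counts_entry m r c hr.1 hr.2 hc.1 hc.2
  refine if_congr ?_ rfl rfl
  apply and_congr_right
  intro _
  simp only [is_accessible, decide_eq_true_eq]
  rw [← hent]
  simp only [pvEntry]
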